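-- pv_equiv track=rewrite | github.com/MarcusStuhr/Advent-Of-Code-2016 | Day11/Day11.py | normalizeFloors
-- ===== SOURCE A (Python) =====
-- def normalizeFloors(floors):
--     normalFloors = []
--     seen = {}
--     index = 0
--     for floor in floors:
--         normalFloor = []
--         for item in sorted(floor):
--             element = item[0]
--             if element not in seen:
--                 seen[element] = str(index)
--                 index+=1
--             normalFloor.append(seen[element] + item[1])
--         normalFloors.append(tuple(sorted(normalFloor)))
--     return normalFloors
-- ===== SOURCE B (Python) =====
-- def normalizeFloors(floors):
--     # canonical scan: first characters of all items, floors in order, items in sorted order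
--     scan = [item[0] for floor in floors for item in sorted(floor)]
--     # label order by rank of first occurrence: sort the distinct elements by their first index
--     elems = sorted(set(scan), key=scan.index)
--     mapping = {e: str(i) for i, e in enumerate(elems)}
--     return [tuple(sorted(mapping[item[0]] + item[1] for item in floor)) for floor in floors]
-- ===== Notes on version B (the rewrite author's own statement) =====
-- stated objective: alternative
-- what changed: Instead of threading a seen-dict and an index counter through nested loops, B flattens the scan into one list of first characters, derives the label table by sorting the distinct characters by their first-occurrence index (rank computation), and then relabels each floor in a comprehension without pre-sorting it.
import Mathlib
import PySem

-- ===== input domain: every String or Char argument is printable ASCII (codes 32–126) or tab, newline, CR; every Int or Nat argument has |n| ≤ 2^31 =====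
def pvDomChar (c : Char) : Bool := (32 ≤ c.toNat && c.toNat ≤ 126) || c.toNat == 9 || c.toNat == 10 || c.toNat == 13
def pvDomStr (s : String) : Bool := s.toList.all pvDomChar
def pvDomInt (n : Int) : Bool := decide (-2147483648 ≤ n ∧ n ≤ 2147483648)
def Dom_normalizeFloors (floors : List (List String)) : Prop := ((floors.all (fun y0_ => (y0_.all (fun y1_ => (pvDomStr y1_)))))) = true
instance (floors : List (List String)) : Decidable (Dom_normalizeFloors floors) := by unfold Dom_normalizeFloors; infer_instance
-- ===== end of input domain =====

-- B replaces A's dict-threading nested loops by a rank computation: flatten the scan, sort the distinct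
-- first-characters by first-occurrence index, relabel from that table (alternative decomposition, same cost).


-- ===== PORT A =====
-- shared helper: Python string concatenation 'label + item[1]' (label : str, item[1] : one char)
def pvCat (a : String) (c : Char) : String := String.ofList (a.toList ++ [c])

def normalizeFloors (floors : List (List String)) : List (List String) :=
  (floors.foldl
    (fun (st : List (List String) × PySem.Dict Char String × Int) floor =>
      let inner := (PySem.List.sorted floor (fun s => s) false).foldl
        (fun (st2 : List String × PySem.Dict Char String × Int) item =>
          let element := (PySem.Str.pyGet? item 0).getD ' '   -- item[0]; Pre_ rules out the IndexError
          let seen := st2.2.1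
          let index := st2.2.2
          let seen' := if seen.contains element then seen
                       else seen.insert element (PySem.Int.toStr index)
          let index' := if seen.contains element then index else index + 1
          (st2.1 ++ [pvCat (seen'.getD element "") ((PySem.Str.pyGet? item 1).getD ' ')], seen', index'))
        (([] : List String), st.2.1, st.2.2)
      (st.1 ++ [PySem.List.sorted inner.1 (fun s => s) false], inner.2.1, inner.2.2))
    (([] : List (List String)), PySem.Dict.empty, (0 : Int))).1

-- ===== PORT B =====
def normalizeFloors_alt (floors : List (List String)) : List (List String) :=
  -- scan = [item[0] for floor in floors for item in sorted(floor)]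
  let scan := floors.flatMap (fun floor =>
    (PySem.List.sorted floor (fun s => s) false).map
      (fun item => (PySem.Str.pyGet? item 0).getD ' '))
  -- elems = sorted(set(scan), key=scan.index)   (scan.index never raises: every e of the set is in scan)
  let elems := PySem.List.sorted (PySem.Set.ofList scan)
    (fun e => (PySem.List.index? scan e).getD 0) false
  -- mapping = {e: str(i) for i, e in enumerate(elems)}
  let mapping := (PySem.List.enumerate elems 0).foldl
    (fun (d : PySem.Dict Char String) p => d.insert p.2 (PySem.Int.toStr p.1)) PySem.Dict.empty
  -- [tuple(sorted(mapping[item[0]] + item[1] for item in floor)) for floor in floors]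
  -- (mapping[item[0]] never raises: every item[0] is in the mapping)
  floors.map (fun floor =>
    PySem.List.sorted
      (floor.map (fun item =>
        pvCat (mapping.getD ((PySem.Str.pyGet? item 0).getD ' ') "")
              ((PySem.Str.pyGet? item 1).getD ' ')))
      (fun s => s) false)

-- ===== PRECONDITION & SPEC =====
-- Pre_ excludes exactly the inputs where Python A raises IndexError: an item string shorter than 2 chars (item[0]/item[1]).
def Pre_normalizeFloors (floors : List (List String)) : Prop :=
  ∀ floor ∈ floors, ∀ item ∈ floor, 2 ≤ item.toList.length
instance (floors : List (List String)) : Decidable (Pre_normalizeFloors floors) := by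
  unfold Pre_normalizeFloors; infer_instance
def pvWitness_normalizeFloors : List (List String) := [["bG", "aG", "aM"], [], ["cM", "aG"]]

def Spec_normalizeFloors (floors : List (List String)) (out : List (List String)) : Prop := out = normalizeFloors_alt floors
instance (floors : List (List String)) (out : List (List String)) : Decidable (Spec_normalizeFloors floors out) := by unfold Spec_normalizeFloors; infer_instance

-- ===== CLAIM (what is proved, stated in full; the proofs are below) =====
def Claim_equal_normalizeFloors : Prop := ∀ (floors : List (List String)), Dom_normalizeFloors floors → Pre_normalizeFloors floors → Spec_normalizeFloors floors (normalizeFloors floors)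

-- ===== LEMMAS AND PROOFS =====

-- first char / second char of an item, A's first-seen step, the relabel function, first-index key
def pvE0 (item : String) : Char := (PySem.Str.pyGet? item 0).getD ' '
def pvC1 (item : String) : Char := (PySem.Str.pyGet? item 1).getD ' '
def pvBStep (ord : List Char) (item : String) : List Char :=
  if pvE0 item ∈ ord then ord else ord ++ [pvE0 item]
def pvG (ord : List Char) (item : String) : String :=
  pvCat (PySem.Int.toStr (((PySem.List.index? ord (pvE0 item)).getD 0 : Nat) : Int)) (pvC1 item)
def pvKey (scan : List Char) (e : Char) : Nat := (PySem.List.index? scan e).getD 0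

-- names (definitionally equal to the inline lambdas of port A) for A's two loop bodies, and the first-seen order
def pvAStep (st2 : List String × PySem.Dict Char String × Int) (item : String) :
    List String × PySem.Dict Char String × Int :=
  let element := (PySem.Str.pyGet? item 0).getD ' '
  let seen := st2.2.1
  let index := st2.2.2
  let seen' := if seen.contains element then seen
               else seen.insert element (PySem.Int.toStr index)
  let index' := if seen.contains element then index else index + 1
  (st2.1 ++ [pvCat (seen'.getD element "") ((PySem.Str.pyGet? item 1).getD ' ')], seen', index')

def pvAOut (st : List (List String) × PySem.Dict Char String × Int) (floor : List String) :
    List (List String) × PySem.Dict Char String × Int :=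
  let inner := (PySem.List.sorted floor (fun s => s) false).foldl pvAStep
    (([] : List String), st.2.1, st.2.2)
  (st.1 ++ [PySem.List.sorted inner.1 (fun s => s) false], inner.2.1, inner.2.2)

def pvOStep (ord : List Char) (floor : List String) : List Char :=
  (PySem.List.sorted floor (fun s => s) false).foldl pvBStep ord

theorem pvAStep_eq (nf : List String) (seen : PySem.Dict Char String) (idx : Int) (item : String) :
    pvAStep (nf, seen, idx) item
      = (nf ++ [pvCat ((if seen.contains (pvE0 item) then seen
                        else seen.insert (pvE0 item) (PySem.Int.toStr idx)).getD (pvE0 item) "") (pvC1 item)],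
         (if seen.contains (pvE0 item) then seen
          else seen.insert (pvE0 item) (PySem.Int.toStr idx)),
         (if seen.contains (pvE0 item) then idx else idx + 1)) := rfl

-- the association list A's dict 'seen' holds once the chars of 'ord' carry labels i, i+1, …
def pvLab (i : Int) : List Char → List (Char × String)
  | [] => []
  | e :: r => (e, PySem.Int.toStr i) :: pvLab (i + 1) r

theorem pvLab_append (a b : List Char) (i : Int) :
    pvLab i (a ++ b) = pvLab i a ++ pvLab (i + a.length) b := by
  induction a generalizing i with
  | nil => simp [pvLab]
  | cons x r ih =>
    have h : i + 1 + (r.length : Int) = i + ((r.length : Int) + 1) := by ring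
    simp only [List.cons_append, pvLab, ih (i + 1), List.length_cons]
    push_cast
    rw [h]

theorem pvContains_lab (ord : List Char) (i : Int) (e : Char) :
    (PySem.Dict.mk (pvLab i ord)).contains e = decide (e ∈ ord) := by
  induction ord generalizing i with
  | nil => simp [pvLab, PySem.Dict.contains]
  | cons x r ih =>
    have h := ih (i + 1)
    simp [pvLab, PySem.Dict.contains] at h ⊢
    by_cases hx : x = e
    · simp [hx, h]
    · simp [beq_iff_eq, hx, Ne.symm hx, h]

theorem pvGetD_lab (ord : List Char) (i : Int) (e : Char) (he : e ∈ ord) :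
    (PySem.Dict.mk (pvLab i ord)).getD e ""
      = PySem.Int.toStr (i + (((PySem.List.index? ord e).getD 0 : Nat) : Int)) := by
  induction ord generalizing i with
  | nil => cases he
  | cons x r ih =>
    by_cases hx : x = e
    · subst hx
      rw [PySem.List.index?_cons_self]
      simp [pvLab, PySem.Dict.getD_eq_get?_getD, PySem.Dict.get?_mk_cons]
    · have he' : e ∈ r := by
        rcases List.mem_cons.mp he with h | h
        · exact absurd h.symm hx
        · exact h
      rw [PySem.List.index?_cons_of_ne r hx]
      obtain ⟨k, hk⟩ := Option.isSome_iff_exists.mp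
        ((PySem.List.index?_isSome_iff (xs := r) (v := e)).mpr he')
      have h2 := ih (i + 1) he'
      rw [hk] at h2 ⊢
      show (PySem.Dict.mk ((x, PySem.Int.toStr i) :: pvLab (i + 1) r)).getD e "" = _
      rw [PySem.Dict.getD_eq_get?_getD, PySem.Dict.get?_mk_cons]
      simp only [beq_iff_eq, hx, if_false, ← PySem.Dict.getD_eq_get?_getD]
      rw [h2]
      simp only [Option.map_some, Option.getD_some]
      congr 1
      push_cast; ring

theorem pvInsert_lab (ord : List Char) (e : Char) (he : e ∉ ord) :
    (PySem.Dict.mk (pvLab 0 ord)).insert e (PySem.Int.toStr (ord.length : Int))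
      = PySem.Dict.mk (pvLab 0 (ord ++ [e])) := by
  apply PySem.Dict.ext
  have hc : (PySem.Dict.mk (pvLab 0 ord)).contains e = false := by
    rw [pvContains_lab]; simpa using he
  rw [PySem.Dict.items_insert_of_not_contains _ _ hc, pvLab_append]
  simp [pvLab]

theorem pvBfold_prefix (its : List String) (ord : List Char) :
    ∃ t, its.foldl pvBStep ord = ord ++ t := by
  induction its generalizing ord with
  | nil => exact ⟨[], by simp⟩
  | cons item rest ih =>
    obtain ⟨t, ht⟩ := ih (pvBStep ord item)
    by_cases h : pvE0 item ∈ ord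
    · exact ⟨t, by simpa [pvBStep, h] using ht⟩
    · exact ⟨pvE0 item :: t, by simpa [pvBStep, h] using ht⟩

theorem pvBfold_mem (its : List String) (ord : List Char) {x : Char} (hx : x ∈ ord) :
    x ∈ its.foldl pvBStep ord := by
  induction its generalizing ord with
  | nil => simpa using hx
  | cons item rest ih =>
    rw [List.foldl_cons]
    refine ih _ ?_
    unfold pvBStep; split_ifs <;> simp [hx]

theorem pvBfold_mem_e0 (its : List String) (ord : List Char) {item : String} (h : item ∈ its) :
    pvE0 item ∈ its.foldl pvBStep ord := by
  induction its generalizing ord with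
  | nil => cases h
  | cons it rest ih =>
    rw [List.foldl_cons]
    rcases List.mem_cons.mp h with h | h
    · subst h
      refine pvBfold_mem _ _ ?_
      unfold pvBStep; split_ifs with hm
      · exact hm
      · simp
    · exact ih _ h

theorem pvG_append (ord t : List Char) (item : String) (he : pvE0 item ∈ ord) :
    pvG (ord ++ t) item = pvG ord item := by
  unfold pvG
  rw [PySem.List.index?_append_of_mem t he]

theorem pvG_of_getD (ord : List Char) (item : String) (he : pvE0 item ∈ ord) :
    pvCat ((PySem.Dict.mk (pvLab 0 ord)).getD (pvE0 item) "") (pvC1 item) = pvG ord item := by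
  rw [pvGetD_lab _ _ _ he]
  simp [pvG]

-- A's inner loop over one floor, from the state described by the label order 'ord'
theorem pvInner (its : List String) (ord : List Char) (nf : List String) :
    its.foldl pvAStep (nf, PySem.Dict.mk (pvLab 0 ord), (ord.length : Int))
    = (nf ++ its.map (pvG (its.foldl pvBStep ord)),
       PySem.Dict.mk (pvLab 0 (its.foldl pvBStep ord)),
       ((its.foldl pvBStep ord).length : Int)) := by
  induction its generalizing ord nf with
  | nil => simp
  | cons item rest ih =>
    rw [List.foldl_cons, List.foldl_cons, pvAStep_eq,
        pvContains_lab ord 0 (pvE0 item)]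
    by_cases h : pvE0 item ∈ ord
    · have hstep : pvBStep ord item = ord := by simp [pvBStep, h]
      simp only [h, decide_true, if_true]
      rw [pvG_of_getD ord item h, ih ord (nf ++ [pvG ord item]), hstep]
      obtain ⟨t, ht⟩ := pvBfold_prefix rest ord
      have hGi : pvG (rest.foldl pvBStep ord) item = pvG ord item := by
        rw [ht]; exact pvG_append ord t item h
      simp [hGi]
    · have hstep : pvBStep ord item = ord ++ [pvE0 item] := by simp [pvBStep, h]
      have hmem : pvE0 item ∈ ord ++ [pvE0 item] := by simp
      simp only [h, decide_false, Bool.false_eq_true, if_false]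
      rw [pvInsert_lab ord (pvE0 item) h, pvG_of_getD (ord ++ [pvE0 item]) item hmem]
      have hlen : (ord.length : Int) + 1 = (((ord ++ [pvE0 item]).length : Nat) : Int) := by
        simp
      rw [hlen, ih (ord ++ [pvE0 item]) (nf ++ [pvG (ord ++ [pvE0 item]) item]), hstep]
      obtain ⟨t, ht⟩ := pvBfold_prefix rest (ord ++ [pvE0 item])
      have hGi : pvG (rest.foldl pvBStep (ord ++ [pvE0 item])) item
          = pvG (ord ++ [pvE0 item]) item := by
        rw [ht]; exact pvG_append _ t item hmem
      simp [hGi]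

theorem pvOfold_prefix (fls : List (List String)) (ord : List Char) :
    ∃ t, fls.foldl pvOStep ord = ord ++ t := by
  induction fls generalizing ord with
  | nil => exact ⟨[], by simp⟩
  | cons fl rest ih =>
    obtain ⟨u, hu⟩ := pvBfold_prefix (PySem.List.sorted fl (fun s => s) false) ord
    obtain ⟨t, ht⟩ := ih (pvOStep ord fl)
    exact ⟨u ++ t, by rw [List.foldl_cons, ht, pvOStep, hu, List.append_assoc]⟩

-- A's outer loop, from the state described by 'ord'
theorem pvOuter (fls : List (List String)) (acc : List (List String)) (ord : List Char) :
    fls.foldl pvAOut (acc, PySem.Dict.mk (pvLab 0 ord), (ord.length : Int))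
    = (acc ++ fls.map (fun floor =>
         PySem.List.sorted
           ((PySem.List.sorted floor (fun s => s) false).map (pvG (fls.foldl pvOStep ord)))
           (fun s => s) false),
       PySem.Dict.mk (pvLab 0 (fls.foldl pvOStep ord)),
       ((fls.foldl pvOStep ord).length : Int)) := by
  induction fls generalizing acc ord with
  | nil => simp
  | cons fl rest ih =>
    rw [List.foldl_cons, List.foldl_cons]
    have hA : pvAOut (acc, PySem.Dict.mk (pvLab 0 ord), (ord.length : Int)) fl
        = (acc ++ [PySem.List.sorted
             ((PySem.List.sorted fl (fun s => s) false).map (pvG (pvOStep ord fl)))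
             (fun s => s) false],
           PySem.Dict.mk (pvLab 0 (pvOStep ord fl)),
           ((pvOStep ord fl).length : Int)) := by
      unfold pvAOut
      rw [show ((acc, PySem.Dict.mk (pvLab 0 ord), (ord.length : Int)).2.1) = PySem.Dict.mk (pvLab 0 ord) from rfl]
      rw [pvInner (PySem.List.sorted fl (fun s => s) false) ord []]
      rfl
    rw [hA, ih _ (pvOStep ord fl)]
    obtain ⟨t, ht⟩ := pvOfold_prefix rest (pvOStep ord fl)
    have hmapeq :
        (PySem.List.sorted fl (fun s => s) false).map (pvG (pvOStep ord fl))
          = (PySem.List.sorted fl (fun s => s) false).map (pvG (rest.foldl pvOStep (pvOStep ord fl))) := by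
      apply List.map_congr_left
      intro item hitem
      have hm : pvE0 item ∈ pvOStep ord fl := pvBfold_mem_e0 _ ord hitem
      rw [ht, pvG_append _ t item hm]
    simp [hmapeq]

theorem pvSortedMapSorted (fl : List String) (f : String → String) :
    PySem.List.sorted ((PySem.List.sorted fl (fun s => s) false).map f) (fun s => s) false
      = PySem.List.sorted (fl.map f) (fun s => s) false := by
  apply PySem.List.sorted_eq_sorted_of_perm
  · exact fun a b h => h
  · exact (PySem.List.sorted_perm fl (fun s => s) false).map f

-- ===== B-side lemmas: the first-seen order IS set(scan) sorted by first index =====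

-- A's first-seen step is PySem.Set.add on the item's first character
theorem pvBStep_eq_add (ord : List Char) (item : String) :
    pvBStep ord item = PySem.Set.add ord (pvE0 item) := by
  unfold pvBStep PySem.Set.add
  by_cases h : pvE0 item ∈ ord
  · simp [h]
  · simp [h]

-- A's whole first-seen order = PySem.Set.ofList of B's flat scan
theorem pvOrd_eq_ofList (floors : List (List String)) :
    floors.foldl pvOStep []
      = PySem.Set.ofList (floors.flatMap (fun floor =>
          (PySem.List.sorted floor (fun s => s) false).map pvE0)) := by
  have h1 : pvBStep = fun (o : List Char) item => PySem.Set.add o (pvE0 item) := by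
    funext o item; exact pvBStep_eq_add o item
  show _ = List.foldl PySem.Set.add PySem.Set.empty _
  rw [List.foldl_flatMap]
  congr 1
  funext ord fl
  show pvOStep ord fl = _
  unfold pvOStep
  rw [h1, ← List.foldl_map]

-- if e is not in pre, its first index in pre ++ e :: rest is pre.length
theorem pvIndex_append_cons_self (pre rest : List Char) (e : Char) (he : e ∉ pre) :
    PySem.List.index? (pre ++ e :: rest) e = some pre.length := by
  induction pre with
  | nil => simpa using PySem.List.index?_cons_self e rest
  | cons x p ih =>
    have hx : x ≠ e := fun h => he (h ▸ List.mem_cons_self)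
    have hp : e ∉ p := fun h => he (List.mem_cons_of_mem x h)
    rw [List.cons_append, PySem.List.index?_cons_of_ne _ hx, ih hp]
    simp

-- the first index of an element of pre (within pre ++ suf) is below pre.length
theorem pvKey_lt_of_mem (pre suf : List Char) (x : Char) (hx : x ∈ pre) :
    pvKey (pre ++ suf) x < pre.length := by
  unfold pvKey
  rw [PySem.List.index?_append_of_mem suf hx]
  obtain ⟨k, hk⟩ := Option.isSome_iff_exists.mp
    ((PySem.List.index?_isSome_iff (xs := pre) (v := x)).mpr hx)
  obtain ⟨h, -, -⟩ := PySem.List.getElem_of_index?_eq_some hk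
  simp only [hk, Option.getD_some]
  exact h

-- invariant: folding Set.add over the rest of the scan keeps the order strictly key-increasing
theorem pvFoldPair (s : List Char) : ∀ (suf pre ord : List Char),
    s = pre ++ suf → (∀ x, x ∈ ord ↔ x ∈ pre) →
    ord.Pairwise (fun a b => pvKey s a < pvKey s b) →
    (suf.foldl PySem.Set.add ord).Pairwise (fun a b => pvKey s a < pvKey s b) := by
  intro suf
  induction suf with
  | nil => intro pre ord _ _ hp; simpa using hp
  | cons e rest ih =>
    intro pre ord hs hiff hp
    rw [List.foldl_cons]
    by_cases he : e ∈ ord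
    · have hadd : PySem.Set.add ord e = ord := by
        unfold PySem.Set.add; simp [he]
      rw [hadd]
      refine ih (pre ++ [e]) ord (by rw [hs]; simp) ?_ hp
      intro x
      rw [hiff x, List.mem_append, List.mem_singleton]
      constructor
      · exact Or.inl
      · rintro (h | h)
        · exact h
        · subst h; exact (hiff x).mp he
    · have hadd : PySem.Set.add ord e = ord ++ [e] := by
        unfold PySem.Set.add; simp [he]
      have hepre : e ∉ pre := fun h => he ((hiff e).mpr h)
      have hkeye : pvKey s e = pre.length := by
        unfold pvKey; rw [hs, pvIndex_append_cons_self pre rest e hepre]; rfl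
      rw [hadd]
      refine ih (pre ++ [e]) (ord ++ [e]) (by rw [hs]; simp) ?_ ?_
      · intro x
        simp only [List.mem_append, List.mem_singleton]
        exact or_congr_left (hiff x)
      · rw [List.pairwise_append]
        refine ⟨hp, by simp, ?_⟩
        intro a ha b hb
        rw [List.mem_singleton] at hb
        rw [hb, hkeye, hs]
        exact pvKey_lt_of_mem pre (e :: rest) a ((hiff a).mp ha)

-- set(scan) (in PySem: first occurrences in order) is already sorted by first index
theorem pvOfList_pairwise (scan : List Char) :
    (PySem.Set.ofList scan).Pairwise (fun a b => pvKey scan a < pvKey scan b) :=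
  pvFoldPair scan scan [] [] rfl (by simp) (by simp)

theorem pvSorted_ofList (scan : List Char) :
    PySem.List.sorted (PySem.Set.ofList scan) (fun e => (PySem.List.index? scan e).getD 0) false
      = PySem.Set.ofList scan :=
  PySem.List.sorted_eq_of_perm_of_pairwise_lt _ _ _ (List.Perm.refl _) (pvOfList_pairwise scan)

-- the dict comprehension over enumerate(elems) builds exactly the labelled association list
theorem pvMapLab : ∀ (rest pre : List Char), (pre ++ rest).Nodup →
    (PySem.List.enumerate rest (pre.length : Int)).foldl
        (fun (d : PySem.Dict Char String) p => d.insert p.2 (PySem.Int.toStr p.1))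
        (PySem.Dict.mk (pvLab 0 pre))
      = PySem.Dict.mk (pvLab 0 (pre ++ rest)) := by
  intro rest
  induction rest with
  | nil => intro pre _; simp [PySem.List.enumerate]
  | cons e r ih =>
    intro pre hnd
    have hepre : e ∉ pre :=
      fun h => List.disjoint_of_nodup_append hnd h List.mem_cons_self
    rw [PySem.List.enumerate_cons, List.foldl_cons]
    have hins := pvInsert_lab pre e hepre
    have hlen : ((pre ++ [e]).length : Int) = (pre.length : Int) + 1 := by simp
    have hnd' : ((pre ++ [e]) ++ r).Nodup := by
      rw [List.append_assoc, List.singleton_append]; exact hnd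
    have := ih (pre ++ [e]) hnd'
    rw [hlen] at this
    show (PySem.List.enumerate r ((pre.length : Int) + 1)).foldl _
        ((PySem.Dict.mk (pvLab 0 pre)).insert e (PySem.Int.toStr (pre.length : Int))) = _
    rw [hins, this, List.append_assoc, List.singleton_append]

theorem pvMain : ∀ (floors : List (List String)), normalizeFloors floors = normalizeFloors_alt floors := by
  intro floors
  have hA : normalizeFloors floors
      = (floors.foldl pvAOut
          (([] : List (List String)), PySem.Dict.mk (pvLab 0 []), ((([] : List Char).length : Nat) : Int))).1 := rfl
  -- the flat scan of B
  set scan : List Char := floors.flatMap (fun floor =>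
    (PySem.List.sorted floor (fun s => s) false).map pvE0) with hscan
  have hB : normalizeFloors_alt floors
      = floors.map (fun fl =>
          PySem.List.sorted
            (fl.map (fun item =>
              pvCat (((PySem.List.enumerate
                        (PySem.List.sorted (PySem.Set.ofList scan)
                          (fun e => (PySem.List.index? scan e).getD 0) false) 0).foldl
                        (fun (d : PySem.Dict Char String) p => d.insert p.2 (PySem.Int.toStr p.1))
                        PySem.Dict.empty).getD (pvE0 item) "")
                    (pvC1 item)))
            (fun s => s) false) := rfl
  have hElems := pvSorted_ofList scan
  have hMap : (PySem.List.enumerate (PySem.Set.ofList scan) (0 : Int)).foldl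
        (fun (d : PySem.Dict Char String) p => d.insert p.2 (PySem.Int.toStr p.1))
        PySem.Dict.empty
      = PySem.Dict.mk (pvLab 0 (PySem.Set.ofList scan)) := by
    have := pvMapLab (PySem.Set.ofList scan) [] (by simp [PySem.Set.nodup_ofList scan])
    simpa [pvLab] using this
  rw [hA, pvOuter floors [] [], hB]
  simp only [List.nil_append]
  rw [pvOrd_eq_ofList floors, ← hscan]
  apply List.map_congr_left
  intro fl hfl
  rw [pvSortedMapSorted fl (pvG (PySem.Set.ofList scan))]
  congr 1
  apply List.map_congr_left
  intro item hitem
  have hmem : pvE0 item ∈ PySem.Set.ofList scan := by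
    rw [PySem.Set.mem_ofList, hscan]
    exact List.mem_flatMap.mpr ⟨fl, hfl,
      List.mem_map.mpr ⟨item, (PySem.List.mem_sorted fl (fun s => s) false item).mpr hitem, rfl⟩⟩
  rw [hElems, hMap, pvG_of_getD (PySem.Set.ofList scan) item hmem]

-- ===== VERDICT (by name: the statement is the Claim_ definition above) =====
theorem normalizeFloors_spec : Claim_equal_normalizeFloors := by
  intro floors _ _
  unfold Spec_normalizeFloors
  exact pvMain floors
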